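-- pv_equiv track=rewrite | github.com/Tiendil/feeds.fun | ffun/ffun/librarian/processors/domain.py | domain_to_parts
-- ===== SOURCE A (Python) =====
-- def domain_to_parts(domain: str) -> list[str]:
--     if domain.startswith("www."):
--         domain = domain[4:]
--
--     parts = []
--
--     while domain:
--         if "." not in domain:
--             # do not add top level domains like .com
--             # they are always on top of the tags list
--             # and it is very rare situation when user wants to score by them
--             break
--
--         parts.append(domain)
--
--         domain = domain.split(".", 1)[1]
--
--     return parts
-- ===== SOURCE B (Python) =====
-- def domain_to_parts(domain: str) -> list[str]:
--     if domain.startswith("www."):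
--         domain = domain[4:]
--     tokens = domain.split(".")
--     return [".".join(tokens[i:]) for i in range(len(tokens) - 1)]
-- ===== Notes on version B (the rewrite author's own statement) =====
-- stated objective: simpler
-- what changed: B tokenizes the domain once on dots and rebuilds each suffix by index with a join over the token tail, instead of A's while-loop that repeatedly re-splits the remaining string at the first dot.
import Mathlib
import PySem

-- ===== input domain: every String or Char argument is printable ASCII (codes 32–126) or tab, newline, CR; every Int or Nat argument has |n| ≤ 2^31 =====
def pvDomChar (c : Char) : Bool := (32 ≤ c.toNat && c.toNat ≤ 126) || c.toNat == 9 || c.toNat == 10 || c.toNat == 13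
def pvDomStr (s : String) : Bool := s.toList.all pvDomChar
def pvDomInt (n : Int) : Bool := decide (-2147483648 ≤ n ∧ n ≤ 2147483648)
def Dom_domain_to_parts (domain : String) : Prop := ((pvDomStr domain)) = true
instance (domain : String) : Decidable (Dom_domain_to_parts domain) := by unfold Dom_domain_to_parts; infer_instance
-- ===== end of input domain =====

-- B tokenizes once with split('.') and rebuilds each suffix by index, instead of A's loop re-splitting with split('.',1); objective: simpler.


-- ===== PORT A =====
-- the part of the remaining domain after the first '.' (what domain.split(".",1)[1] yields when '.' is present)
def pvAfterDot (cs : List Char) : List Char := (cs.dropWhile (· != '.')).tail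

-- termination lemma for A's while loop (the remainder after split(".",1)[1] is strictly shorter)
theorem pvAfterDot_length_lt (cs : List Char) (h : '.' ∈ cs) :
    (pvAfterDot cs).length < cs.length := by
  unfold pvAfterDot
  have hne : cs.dropWhile (· != '.') ≠ [] := by
    intro hnil
    have := List.dropWhile_eq_nil_iff.mp hnil
    have := this '.' h
    simp at this
  have h1 : (cs.dropWhile (· != '.')).length ≤ cs.length := List.length_dropWhile_le _ _
  have h2 : (cs.dropWhile (· != '.')).tail.length < (cs.dropWhile (· != '.')).length := by
    cases hcs : cs.dropWhile (· != '.') with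
    | nil => exact absurd hcs hne
    | cons a t => simp
  omega

-- A's loop: splitOnMax cs ['.'] 1 = [before, after] when '.' is present; needed for the decreasing_by
theorem pvSplitOnMax_go_zero (fuel : Nat) (l cur : List Char) (acc : List (List Char)) :
    PySem.Chars.splitOnMax.go ['.'] fuel 0 l cur acc = acc.reverse ++ [cur.reverse ++ l] := by
  cases fuel with
  | zero => simp [PySem.Chars.splitOnMax.go]
  | succ f => cases l with
    | nil => simp [PySem.Chars.splitOnMax.go]
    | cons c rest => simp [PySem.Chars.splitOnMax.go]

theorem pvSplitOnMax_go_one (l : List Char) : ∀ (fuel : Nat) (cur : List Char)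
    (acc : List (List Char)), l.length < fuel →
    PySem.Chars.splitOnMax.go ['.'] fuel 1 l cur acc =
      if '.' ∈ l then acc.reverse ++ [cur.reverse ++ l.takeWhile (· != '.'), pvAfterDot l]
      else acc.reverse ++ [cur.reverse ++ l] := by
  induction l with
  | nil =>
    intro fuel cur acc hf
    cases fuel with
    | zero => omega
    | succ f => simp [PySem.Chars.splitOnMax.go]
  | cons c rest ih =>
    intro fuel cur acc hf
    cases fuel with
    | zero => simp at hf
    | succ f =>
      by_cases hc : c = '.'
      · subst hc
        simp [PySem.Chars.splitOnMax.go, List.isPrefixOf, pvSplitOnMax_go_zero, pvAfterDot,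
          List.takeWhile, List.dropWhile]
      · have hlt : rest.length < f := by simp at hf; omega
        have hpre : (['.'] : List Char).isPrefixOf (c :: rest) = false := by
          simp [List.isPrefixOf]; exact fun h => hc h.symm
        rw [show PySem.Chars.splitOnMax.go ['.'] (f+1) 1 (c :: rest) cur acc =
            PySem.Chars.splitOnMax.go ['.'] f 1 rest (c :: cur) acc by
          simp [PySem.Chars.splitOnMax.go, hpre]]
        rw [ih f (c :: cur) acc hlt]
        have hmem : ('.' ∈ c :: rest) = ('.' ∈ rest) := by simp [hc]; exact fun h => absurd h.symm hc
        simp only [List.takeWhile, List.dropWhile, pvAfterDot]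
        have hcb : (c != '.') = true := by simp [hc]
        by_cases hm : '.' ∈ rest
        · simp [hm, hc, hcb, List.takeWhile, List.dropWhile, pvAfterDot]
        · have : ¬ ('.' ∈ c :: rest) := by simp [hm]; exact fun h => absurd h.symm hc
          simp [hm, this, hcb]

theorem pvSplitOnMax_one (cs : List Char) :
    PySem.Chars.splitOnMax cs ['.'] 1 =
      if '.' ∈ cs then [cs.takeWhile (· != '.'), pvAfterDot cs] else [cs] := by
  have : PySem.Chars.splitOnMax cs ['.'] 1 =
      PySem.Chars.splitOnMax.go ['.'] (cs.length + 1) 1 cs [] [] := by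
    simp [PySem.Chars.splitOnMax]
  rw [this, pvSplitOnMax_go_one cs (cs.length + 1) [] [] (by omega)]
  split <;> simp

theorem pvIsIn_dot (cs : List Char) : PySem.Chars.isIn ['.'] cs = true ↔ '.' ∈ cs := by
  rw [PySem.Chars.isIn_iff_infix]
  constructor
  · rintro ⟨p, s, h⟩; subst h; simp
  · intro h
    obtain ⟨p, s, h⟩ := List.append_of_mem h
    exact ⟨p, s, by simp [h]⟩

-- the loop body's remainder, as A computes it
theorem pvRemainder_eq (cs : List Char) (h : '.' ∈ cs) :
    (PySem.List.pyGet? (PySem.Chars.splitOnMax cs ['.'] 1) 1).getD [] = pvAfterDot cs := by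
  rw [pvSplitOnMax_one, if_pos h]
  simp [PySem.List.pyGet?, PySem.List.pyIdx?]

-- the while loop of A, on code points
def pvALoop (domain : List Char) : List (List Char) :=
  if domain = [] then []
  else if PySem.Chars.isIn ['.'] domain = false then []
  else domain :: pvALoop ((PySem.List.pyGet? (PySem.Chars.splitOnMax domain ['.'] 1) 1).getD [])
termination_by domain.length
decreasing_by
  rename_i h1 h2
  have hm : '.' ∈ domain := (pvIsIn_dot domain).mp (by simpa using h2)
  rw [pvRemainder_eq domain hm]
  exact pvAfterDot_length_lt domain hm

def domain_to_parts (domain : String) : List String :=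
  let cs := domain.toList
  let cs := if PySem.Chars.startswith cs "www.".toList then PySem.Chars.slice cs (some 4) none else cs
  (pvALoop cs).map String.mk

-- ===== PORT B =====
def domain_to_parts_alt (domain : String) : List String :=
  let cs := domain.toList
  let cs := if PySem.Chars.startswith cs "www.".toList then PySem.Chars.slice cs (some 4) none else cs
  let tokens := PySem.Chars.splitOn cs ['.']
  (List.range (tokens.length - 1)).map
    (fun (i : Nat) => String.mk (PySem.Chars.join ['.'] (PySem.List.slice tokens (some (Int.ofNat i)) none)))

-- ===== PRECONDITION & SPEC =====
def Spec_domain_to_parts (domain : String) (out : List String) : Prop := out = domain_to_parts_alt domain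
instance (domain : String) (out : List String) : Decidable (Spec_domain_to_parts domain out) := by unfold Spec_domain_to_parts; infer_instance

-- ===== CLAIM (what is proved, stated in full; the proofs are below) =====
def Claim_equal_domain_to_parts : Prop := ∀ (domain : String), Dom_domain_to_parts domain → Spec_domain_to_parts domain (domain_to_parts domain)

-- ===== LEMMAS AND PROOFS =====

-- reference form of cs.split('.')
def pvSplitD (cs : List Char) : List (List Char) :=
  match cs with
  | [] => [[]]
  | c :: rest =>
    if c = '.' then [] :: pvSplitD rest
    else match pvSplitD rest with
      | [] => [[c]]
      | t :: ts => (c :: t) :: ts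

theorem pvSplitD_ne_nil (cs : List Char) : pvSplitD cs ≠ [] := by
  cases cs with
  | nil => simp [pvSplitD]
  | cons c rest =>
    simp only [pvSplitD]
    split
    · simp
    · split <;> simp

theorem pvSplitOn_go (l : List Char) : ∀ (fuel : Nat) (cur : List Char)
    (acc : List (List Char)), l.length < fuel →
    PySem.Chars.splitOn.go ['.'] fuel l cur acc =
      acc.reverse ++ (match pvSplitD l with
        | [] => []
        | t :: ts => (cur.reverse ++ t) :: ts) := by
  induction l with
  | nil =>
    intro fuel cur acc hf
    cases fuel with
    | zero => omega
    | succ f => simp [PySem.Chars.splitOn.go, pvSplitD]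
  | cons c rest ih =>
    intro fuel cur acc hf
    cases fuel with
    | zero => simp at hf
    | succ f =>
      have hlt : rest.length < f := by simp at hf; omega
      by_cases hc : c = '.'
      · subst hc
        have : (['.'] : List Char).isPrefixOf ('.' :: rest) = true := by simp [List.isPrefixOf]
        simp only [PySem.Chars.splitOn.go, this, if_pos]
        rw [show List.drop (['.'] : List Char).length ('.' :: rest) = rest by simp]
        rw [ih f [] (cur.reverse :: acc) hlt]
        simp only [pvSplitD, if_pos rfl]
        cases h : pvSplitD rest with
        | nil => exact absurd h (pvSplitD_ne_nil rest)
        | cons t ts => simp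
      · have hpre : (['.'] : List Char).isPrefixOf (c :: rest) = false := by
          simp [List.isPrefixOf]; exact fun h => hc h.symm
        rw [show PySem.Chars.splitOn.go ['.'] (f+1) (c :: rest) cur acc =
            PySem.Chars.splitOn.go ['.'] f rest (c :: cur) acc by
          simp [PySem.Chars.splitOn.go, hpre]]
        rw [ih f (c :: cur) acc hlt]
        simp only [pvSplitD, if_neg hc]
        cases h : pvSplitD rest with
        | nil => exact absurd h (pvSplitD_ne_nil rest)
        | cons t ts => simp

theorem pvSplitOn_eq (cs : List Char) : PySem.Chars.splitOn cs ['.'] = pvSplitD cs := by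
  have : PySem.Chars.splitOn cs ['.'] = PySem.Chars.splitOn.go ['.'] (cs.length + 1) cs [] [] := by
    simp [PySem.Chars.splitOn]
  rw [this, pvSplitOn_go cs (cs.length + 1) [] [] (by omega)]
  cases h : pvSplitD cs with
  | nil => exact absurd h (pvSplitD_ne_nil cs)
  | cons t ts => simp

theorem pvSplitD_no_dot (cs : List Char) (h : '.' ∉ cs) : pvSplitD cs = [cs] := by
  induction cs with
  | nil => simp [pvSplitD]
  | cons c rest ih =>
    have hc : c ≠ '.' := fun hx => h (by simp [hx])
    have hr : '.' ∉ rest := fun hx => h (by simp [hx])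
    simp only [pvSplitD, if_neg hc, ih hr]

theorem pvSplitD_dot (cs : List Char) (h : '.' ∈ cs) :
    pvSplitD cs = cs.takeWhile (· != '.') :: pvSplitD (pvAfterDot cs) := by
  induction cs with
  | nil => simp at h
  | cons c rest ih =>
    by_cases hc : c = '.'
    · subst hc
      simp [pvSplitD, pvAfterDot, List.takeWhile, List.dropWhile]
    · have hr : '.' ∈ rest := by
        rcases List.mem_cons.mp h with h' | h'
        · exact absurd h'.symm hc
        · exact h'
      have hcb : (c != '.') = true := by simp [hc]
      simp [pvSplitD, if_neg hc, ih hr, List.takeWhile, hcb, pvAfterDot, List.dropWhile]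

theorem pvJoin_splitD (cs : List Char) : PySem.Chars.join ['.'] (pvSplitD cs) = cs := by
  induction cs with
  | nil => simp [pvSplitD, PySem.Chars.join, List.intercalate]
  | cons c rest ih =>
    by_cases hc : c = '.'
    · subst hc
      simp only [pvSplitD, if_pos]
      cases h : pvSplitD rest with
      | nil => exact absurd h (pvSplitD_ne_nil rest)
      | cons t ts =>
        rw [h] at ih
        rw [PySem.Chars.join_cons_cons, ih]
        rfl
    · simp only [pvSplitD, if_neg hc]
      cases h : pvSplitD rest with
      | nil => exact absurd h (pvSplitD_ne_nil rest)
      | cons t ts =>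
        cases ts with
        | nil =>
          rw [h] at ih
          rw [PySem.Chars.join_singleton] at ih
          show PySem.Chars.join ['.'] [c :: t] = c :: rest
          rw [PySem.Chars.join_singleton, ih]
        | cons t2 ts2 =>
          rw [h] at ih
          show PySem.Chars.join ['.'] ((c :: t) :: t2 :: ts2) = c :: rest
          rw [PySem.Chars.join_cons_cons, ← ih, PySem.Chars.join_cons_cons]
          rfl

-- main: A's loop equals B's indexed suffix construction
theorem pvMain (cs : List Char) :
    pvALoop cs = (List.range ((pvSplitD cs).length - 1)).map
      (fun i => PySem.Chars.join ['.'] ((pvSplitD cs).drop i)) := by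
  by_cases hm : '.' ∈ cs
  · rw [pvALoop, if_neg (by rintro rfl; simp at hm),
      if_neg (by simp [(pvIsIn_dot cs).mpr hm]), pvRemainder_eq cs hm]
    have ih := pvMain (pvAfterDot cs)
    rw [pvSplitD_dot cs hm]
    cases h : pvSplitD (pvAfterDot cs) with
    | nil => exact absurd h (pvSplitD_ne_nil _)
    | cons t ts =>
      rw [h] at ih
      have hlen : (cs.takeWhile (· != '.') :: t :: ts).length - 1 = ts.length + 1 := by simp
      rw [hlen, List.range_succ_eq_map, List.map_cons, List.map_map]
      have h0 : PySem.Chars.join ['.'] ((cs.takeWhile (· != '.') :: t :: ts).drop 0) = cs := by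
        have := pvJoin_splitD cs
        rw [pvSplitD_dot cs hm, h] at this
        simpa using this
      rw [h0]
      congr 1
  · have hin : PySem.Chars.isIn ['.'] cs = false := by
      cases hI : PySem.Chars.isIn ['.'] cs
      · rfl
      · exact absurd ((pvIsIn_dot cs).mp hI) hm
    rw [pvALoop, pvSplitD_no_dot cs hm]
    simp [hin]
termination_by cs.length
decreasing_by exact pvAfterDot_length_lt cs hm

-- ===== VERDICT (by name: the statement is the Claim_ definition above) =====
theorem domain_to_parts_spec : Claim_equal_domain_to_parts := by
  intro domain _
  unfold Spec_domain_to_parts domain_to_parts domain_to_parts_alt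
  simp only [pvSplitOn_eq]
  set cs := if PySem.Chars.startswith domain.toList "www.".toList
    then PySem.Chars.slice domain.toList (some 4) none else domain.toList with hcs
  rw [pvMain cs, List.map_map]
  apply List.map_congr_left
  intro i hi
  simp only [List.mem_range] at hi
  have : PySem.List.slice (pvSplitD cs) (some (i : Int)) none = (pvSplitD cs).drop i :=
    PySem.List.slice_from_natCast _ _
  simp [this, Function.comp]
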